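-- pv_equiv track=rewrite | github.com/skabir8/CryptoSent | utils/queries.py | get_inv_not
-- ===== SOURCE A (Python) =====
-- def get_inv_not(not_list, i_index):
--     counter = 0
--     hold = []
--     for x in not_list:
--         if (x in i_index):
--             counter += 1
--             hold.extend(i_index[x])
--     if (counter == len(not_list)):
--         return hold
--     else:
--         return []
-- ===== SOURCE B (Python) =====
-- def get_inv_not(not_list, i_index):
--     def go(i):
--         # collect values for not_list[i:]; None signals a missing key (abort early)
--         if i == len(not_list):
--             return []
--         if not_list[i] not in i_index:
--             return None
--         rest = go(i + 1)
--         if rest is None: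
--             return None
--         return list(i_index[not_list[i]]) + rest
--     r = go(0)
--     return [] if r is None else r
-- ===== Notes on version B (the rewrite author's own statement) =====
-- stated objective: alternative
-- what changed: Replaces A's single fused loop (counter plus eagerly extended accumulator, checked against len at the end) with a short-circuiting recursion over the list that returns an Option-style None on the first missing key and otherwise builds the concatenation back-to-front.
import Mathlib
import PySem

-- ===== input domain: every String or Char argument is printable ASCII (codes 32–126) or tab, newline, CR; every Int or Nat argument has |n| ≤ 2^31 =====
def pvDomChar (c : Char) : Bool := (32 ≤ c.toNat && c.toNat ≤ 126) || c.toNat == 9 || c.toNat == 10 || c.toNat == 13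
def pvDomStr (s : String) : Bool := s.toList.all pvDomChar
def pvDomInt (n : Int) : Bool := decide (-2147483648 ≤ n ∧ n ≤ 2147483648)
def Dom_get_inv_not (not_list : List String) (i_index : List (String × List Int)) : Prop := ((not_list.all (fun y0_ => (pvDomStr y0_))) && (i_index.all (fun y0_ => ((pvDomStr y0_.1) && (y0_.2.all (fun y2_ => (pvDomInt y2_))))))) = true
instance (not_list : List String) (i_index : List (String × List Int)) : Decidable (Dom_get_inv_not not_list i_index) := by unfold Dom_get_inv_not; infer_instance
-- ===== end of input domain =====

-- B replaces A's fused counter-and-extend loop with a short-circuiting recursion (Option) that aborts on the first missing key and builds the result back-to-front; alternative decomposition, return value unchanged.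


-- shared dict primitives: 'x in i_index' and 'i_index[x]' (first match; key always present when used)
def pvHasKey (i_index : List (String × List Int)) (x : String) : Bool :=
  i_index.any (fun p => p.1 == x)

def pvLookup (i_index : List (String × List Int)) (x : String) : List Int :=
  ((i_index.find? (fun p => p.1 == x)).map Prod.snd).getD []

-- ===== PORT A =====
def get_inv_not (not_list : List String) (i_index : List (String × List Int)) : List Int :=
  let s := not_list.foldl
    (fun (s : Int × List Int) x =>
      if pvHasKey i_index x then (s.1 + 1, s.2 ++ pvLookup i_index x) else s)
    (0, [])
  if s.1 = (not_list.length : Int) then s.2 else []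

-- ===== PORT B =====
-- Source B's inner 'go': recursion over the remaining suffix of not_list; none = missing key
def get_inv_not_go (i_index : List (String × List Int)) : List String → Option (List Int)
  | [] => some []
  | x :: t =>
    if pvHasKey i_index x then
      match get_inv_not_go i_index t with
      | none => none
      | some rest => some (pvLookup i_index x ++ rest)
    else none

def get_inv_not_alt (not_list : List String) (i_index : List (String × List Int)) : List Int :=
  match get_inv_not_go i_index not_list with
  | none => []
  | some r => r

-- ===== PRECONDITION & SPEC =====
def Spec_get_inv_not (not_list : List String) (i_index : List (String × List Int)) (out : List Int) : Prop := out = get_inv_not_alt not_list i_index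
instance (not_list : List String) (i_index : List (String × List Int)) (out : List Int) : Decidable (Spec_get_inv_not not_list i_index out) := by unfold Spec_get_inv_not; infer_instance

-- ===== CLAIM =====
def Claim_equal_get_inv_not : Prop := ∀ (not_list : List String) (i_index : List (String × List Int)), Dom_get_inv_not not_list i_index → Spec_get_inv_not not_list i_index (get_inv_not not_list i_index)

-- ===== LEMMAS AND PROOFS =====

-- A's fold computes the count of present keys and the concatenation of their value lists
theorem get_inv_not_foldl (i_index : List (String × List Int)) (l : List String)
    (c : Int) (h : List Int) :
    l.foldl
      (fun (s : Int × List Int) x =>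
        if pvHasKey i_index x then (s.1 + 1, s.2 ++ pvLookup i_index x) else s)
      (c, h)
    = (c + (l.countP (fun x => pvHasKey i_index x) : Int),
       h ++ (l.filter (fun x => pvHasKey i_index x)).flatMap (fun x => pvLookup i_index x)) := by
  induction l generalizing c h with
  | nil => simp
  | cons a t ih =>
    by_cases ha : pvHasKey i_index a
    · simp [List.foldl_cons, ha, ih]
      ring
    · simp [List.foldl_cons, ha, ih]

-- B's recursion returns some (flattened values) iff every key is present, none otherwise
theorem get_inv_not_go_eq (i_index : List (String × List Int)) (l : List String) :
    get_inv_not_go i_index l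
    = if ∀ x ∈ l, pvHasKey i_index x = true
      then some (l.flatMap (fun x => pvLookup i_index x))
      else none := by
  induction l with
  | nil => simp [get_inv_not_go]
  | cons a t ih =>
    by_cases ha : pvHasKey i_index a
    · by_cases ht : ∀ x ∈ t, pvHasKey i_index x = true
      · have hall : ∀ x ∈ a :: t, pvHasKey i_index x = true := by
          intro x hx
          rcases List.mem_cons.mp hx with h | h
          · exact h ▸ ha
          · exact ht x h
        simp [get_inv_not_go, ha, ih, if_pos ht, if_pos hall]
      · have hna : ¬ ∀ x ∈ a :: t, pvHasKey i_index x = true := by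
          intro h; exact ht (fun x hx => h x (List.mem_cons_of_mem _ hx))
        simp [get_inv_not_go, ha, ih, if_neg ht, if_neg hna]
    · have hna : ¬ ∀ x ∈ a :: t, pvHasKey i_index x = true := by
        intro h; exact ha (h a (List.mem_cons_self))
      simp [get_inv_not_go, ha, if_neg hna]

-- ===== VERDICT =====
theorem get_inv_not_spec : Claim_equal_get_inv_not := by
  intro not_list i_index _
  unfold Spec_get_inv_not get_inv_not get_inv_not_alt
  rw [get_inv_not_foldl, get_inv_not_go_eq]
  simp only [Int.zero_add]
  by_cases hall : ∀ x ∈ not_list, pvHasKey i_index x = true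
  · have hcount : not_list.countP (fun x => pvHasKey i_index x) = not_list.length :=
      List.countP_eq_length.mpr hall
    have hfilter : not_list.filter (fun x => pvHasKey i_index x) = not_list :=
      List.filter_eq_self.mpr hall
    rw [if_pos hall]
    simp [hcount, hfilter]
  · have hcount : not_list.countP (fun x => pvHasKey i_index x) ≠ not_list.length := by
      intro hc; exact hall (List.countP_eq_length.mp hc)
    have : ((not_list.countP (fun x => pvHasKey i_index x) : Int)) ≠ (not_list.length : Int) := by
      exact_mod_cast hcount
    rw [if_neg hall]
    simp [this]
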